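-- pv_equiv track=rewrite | github.com/jamie-c/flavor-communities | get_ingredients.py | is_unit_of_measure
-- ===== SOURCE A (Python) =====
-- UNITS_OF_MEASURE = [
--     "g",
--     "gram",
--     "oz",
--     "ounce",
--     "lb",
--     "pound",
--     "ea",
--     "each",
--     "clove",
--     "piece",
--     "handful",
--     "sm",
--     "small",
--     "med",
--     "medium",
--     "lg",
--     "large",
--     "t",
--     "tsp",
--     "teaspoon",
--     "tbsp",
--     "tablespoon",
--     "c",
--     "cup",
--     "ml",
--     "l",
--     "qt",
--     "quart",
--     "liter",
--     "gal",
--     "gallon",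
--     "sheet",
-- ]
--
-- def is_unit_of_measure(word: str) -> bool:
--     """
--     Check if the given word is in the list of UNITS_OF_MEASURE.
--
--     Args:
--         word (str): The word to search for in the list. Want to know if the word is a unit of measure.
--
--     Returns:
--         bool: True if the word is in the list, False otherwise.
--     """
--
--     # Check if the input parameter is of the correct type
--     if not isinstance(word, str):
--         raise TypeError("The word parameter must be a string.")
--
--     # Check if the word is in the list and return the result
--     # Iterate through the list of units of measure and check also for the plural version
--     for unit in UNITS_OF_MEASURE:
--         if word.lower() == unit:
--             return True
--         elif word.lower() == unit + "s":
--             return True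
--
--     # If the above has not returned True, need to return False
--     return False
-- ===== SOURCE B (Python) =====
-- UNITS_OF_MEASURE = [
--     "g", "gram", "oz", "ounce", "lb", "pound", "ea", "each", "clove",
--     "piece", "handful", "sm", "small", "med", "medium", "lg", "large",
--     "t", "tsp", "teaspoon", "tbsp", "tablespoon", "c", "cup", "ml", "l",
--     "qt", "quart", "liter", "gal", "gallon", "sheet",
-- ]
--
-- # All accepted spellings (each unit and its plural), deduplicated and sorted once,
-- # so lookup is a binary search over this table.
-- FORMS = sorted({form for unit in UNITS_OF_MEASURE for form in (unit, unit + "s")})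
--
--
-- def is_unit_of_measure(word: str) -> bool:
--     if not isinstance(word, str):
--         raise TypeError("The word parameter must be a string.")
--     w = word.lower()
--     lo, hi = 0, len(FORMS)
--     while lo < hi:
--         mid = (lo + hi) // 2
--         if FORMS[mid] < w:
--             lo = mid + 1
--         else:
--             hi = mid
--     return lo < len(FORMS) and FORMS[lo] == w
-- ===== Notes on version B (the rewrite author's own statement) =====
-- stated objective: faster
-- what changed: Instead of scanning the unit list and comparing the word against each unit and its plural form, B precomputes a sorted table of all accepted spellings (singulars and plurals) and finds the lowercased word by a hand-written lower-bound binary search.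
import Mathlib
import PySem

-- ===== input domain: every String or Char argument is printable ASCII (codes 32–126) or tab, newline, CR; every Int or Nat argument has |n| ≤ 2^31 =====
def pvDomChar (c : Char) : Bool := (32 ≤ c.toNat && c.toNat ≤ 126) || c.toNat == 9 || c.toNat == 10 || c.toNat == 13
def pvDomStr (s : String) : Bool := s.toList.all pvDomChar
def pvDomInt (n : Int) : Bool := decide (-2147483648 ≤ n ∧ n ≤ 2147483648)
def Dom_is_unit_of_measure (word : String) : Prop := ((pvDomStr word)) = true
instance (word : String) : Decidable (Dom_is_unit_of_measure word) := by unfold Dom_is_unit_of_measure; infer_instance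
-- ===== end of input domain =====

-- B replaces A's linear scan (comparing the word against each unit and unit + "s") by a
-- lower-bound binary search over a precomputed sorted table of all accepted spellings.


-- ===== PORT A =====
-- UNITS_OF_MEASURE, as lists of code points (PySem string operations are defined on List Char)
def pvUnits : List (List Char) :=
  [['g'],
   ['g', 'r', 'a', 'm'],
   ['o', 'z'],
   ['o', 'u', 'n', 'c', 'e'],
   ['l', 'b'],
   ['p', 'o', 'u', 'n', 'd'],
   ['e', 'a'],
   ['e', 'a', 'c', 'h'],
   ['c', 'l', 'o', 'v', 'e'],
   ['p', 'i', 'e', 'c', 'e'],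
   ['h', 'a', 'n', 'd', 'f', 'u', 'l'],
   ['s', 'm'],
   ['s', 'm', 'a', 'l', 'l'],
   ['m', 'e', 'd'],
   ['m', 'e', 'd', 'i', 'u', 'm'],
   ['l', 'g'],
   ['l', 'a', 'r', 'g', 'e'],
   ['t'],
   ['t', 's', 'p'],
   ['t', 'e', 'a', 's', 'p', 'o', 'o', 'n'],
   ['t', 'b', 's', 'p'],
   ['t', 'a', 'b', 'l', 'e', 's', 'p', 'o', 'o', 'n'],
   ['c'],
   ['c', 'u', 'p'],
   ['m', 'l'],
   ['l'],
   ['q', 't'],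
   ['q', 'u', 'a', 'r', 't'],
   ['l', 'i', 't', 'e', 'r'],
   ['g', 'a', 'l'],
   ['g', 'a', 'l', 'l', 'o', 'n'],
   ['s', 'h', 'e', 'e', 't']]

-- A's for-loop: compare word.lower() against each unit and unit plus the plural suffix, return True on the first hit
def pvLoopA (w : List Char) : List (List Char) → Bool
  | [] => false
  | u :: rest =>
    if w == u then true
    else if w == u ++ ['s'] then true
    else pvLoopA w rest

def is_unit_of_measure (word : String) : Bool :=
  pvLoopA (PySem.Chars.lower word.toList) pvUnits

-- ===== PORT B =====
-- FORMS = sorted({unit, unit+"s" for unit in UNITS_OF_MEASURE}): B's precomputed sorted table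
def pvForms : List (List Char) :=
  [['c'],
   ['c', 'l', 'o', 'v', 'e'],
   ['c', 'l', 'o', 'v', 'e', 's'],
   ['c', 's'],
   ['c', 'u', 'p'],
   ['c', 'u', 'p', 's'],
   ['e', 'a'],
   ['e', 'a', 'c', 'h'],
   ['e', 'a', 'c', 'h', 's'],
   ['e', 'a', 's'],
   ['g'],
   ['g', 'a', 'l'],
   ['g', 'a', 'l', 'l', 'o', 'n'],
   ['g', 'a', 'l', 'l', 'o', 'n', 's'],
   ['g', 'a', 'l', 's'],
   ['g', 'r', 'a', 'm'],
   ['g', 'r', 'a', 'm', 's'],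
   ['g', 's'],
   ['h', 'a', 'n', 'd', 'f', 'u', 'l'],
   ['h', 'a', 'n', 'd', 'f', 'u', 'l', 's'],
   ['l'],
   ['l', 'a', 'r', 'g', 'e'],
   ['l', 'a', 'r', 'g', 'e', 's'],
   ['l', 'b'],
   ['l', 'b', 's'],
   ['l', 'g'],
   ['l', 'g', 's'],
   ['l', 'i', 't', 'e', 'r'],
   ['l', 'i', 't', 'e', 'r', 's'],
   ['l', 's'],
   ['m', 'e', 'd'],
   ['m', 'e', 'd', 'i', 'u', 'm'],
   ['m', 'e', 'd', 'i', 'u', 'm', 's'],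
   ['m', 'e', 'd', 's'],
   ['m', 'l'],
   ['m', 'l', 's'],
   ['o', 'u', 'n', 'c', 'e'],
   ['o', 'u', 'n', 'c', 'e', 's'],
   ['o', 'z'],
   ['o', 'z', 's'],
   ['p', 'i', 'e', 'c', 'e'],
   ['p', 'i', 'e', 'c', 'e', 's'],
   ['p', 'o', 'u', 'n', 'd'],
   ['p', 'o', 'u', 'n', 'd', 's'],
   ['q', 't'],
   ['q', 't', 's'],
   ['q', 'u', 'a', 'r', 't'],
   ['q', 'u', 'a', 'r', 't', 's'],
   ['s', 'h', 'e', 'e', 't'],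
   ['s', 'h', 'e', 'e', 't', 's'],
   ['s', 'm'],
   ['s', 'm', 'a', 'l', 'l'],
   ['s', 'm', 'a', 'l', 'l', 's'],
   ['s', 'm', 's'],
   ['t'],
   ['t', 'a', 'b', 'l', 'e', 's', 'p', 'o', 'o', 'n'],
   ['t', 'a', 'b', 'l', 'e', 's', 'p', 'o', 'o', 'n', 's'],
   ['t', 'b', 's', 'p'],
   ['t', 'b', 's', 'p', 's'],
   ['t', 'e', 'a', 's', 'p', 'o', 'o', 'n'],
   ['t', 'e', 'a', 's', 'p', 'o', 'o', 'n', 's'],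
   ['t', 's'],
   ['t', 's', 'p'],
   ['t', 's', 'p', 's']]

-- Python's `<` on strings: lexicographic by code point (exact for these char lists)
def lexLt : List Char → List Char → Bool
  | [], [] => false
  | [], _ :: _ => true
  | _ :: _, [] => false
  | a :: as, b :: bs => if a < b then true else if b < a then false else lexLt as bs

-- B's while-loop: lower-bound binary search (FORMS[mid] accessed in range, so getD is exact)
def bsLoop (w : List Char) (lo hi : Nat) : Nat :=
  if h : lo < hi then
    if lexLt (pvForms.getD ((lo + hi) / 2) []) w
    then bsLoop w ((lo + hi) / 2 + 1) hi
    else bsLoop w lo ((lo + hi) / 2)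
  else lo
termination_by hi - lo
decreasing_by all_goals omega

-- return lo < len(FORMS) and FORMS[lo] == w
def is_unit_of_measure_alt (word : String) : Bool :=
  let w := PySem.Chars.lower word.toList
  let lo := bsLoop w 0 pvForms.length
  decide (lo < pvForms.length) && (pvForms.getD lo [] == w)

-- ===== PRECONDITION & SPEC =====
def Spec_is_unit_of_measure (word : String) (out : Bool) : Prop := out = is_unit_of_measure_alt word
instance (word : String) (out : Bool) : Decidable (Spec_is_unit_of_measure word out) := by unfold Spec_is_unit_of_measure; infer_instance

-- ===== CLAIM (what is proved, stated in full; the proofs are below) =====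
def Claim_equal_is_unit_of_measure : Prop := ∀ (word : String), Dom_is_unit_of_measure word → Spec_is_unit_of_measure word (is_unit_of_measure word)

-- ===== LEMMAS AND PROOFS =====

theorem lexLt_irrefl (a : List Char) : lexLt a a = false := by
  induction a with
  | nil => rfl
  | cons x xs ih => simp [lexLt, ih]

theorem lexLt_trans (a b c : List Char) (h1 : lexLt a b = true) (h2 : lexLt b c = true) :
    lexLt a c = true := by
  induction a generalizing b c with
  | nil =>
    cases c with
    | nil => cases b with
      | nil => simp [lexLt] at h1
      | cons y ys => simp [lexLt] at h2
    | cons z zs => simp [lexLt]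
  | cons x xs ih =>
    cases b with
    | nil => simp [lexLt] at h1
    | cons y ys =>
      cases c with
      | nil => simp [lexLt] at h2
      | cons z zs =>
        by_cases hxy : x < y
        · by_cases hyz : y < z
          · simp [lexLt, lt_trans hxy hyz]
          · by_cases hzy : z < y
            · simp [lexLt, hyz, hzy] at h2
            · have hyz' : y = z := le_antisymm (not_lt.mp hzy) (not_lt.mp hyz)
              subst hyz'
              simp [lexLt, hxy]
        · by_cases hyx : y < x
          · simp [lexLt, hxy, hyx] at h1
          · have hxy' : x = y := le_antisymm (not_lt.mp hyx) (not_lt.mp hxy)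
            subst hxy'
            have h1' : lexLt xs ys = true := by simpa [lexLt, lt_irrefl] using h1
            by_cases hxz : x < z
            · simp [lexLt, hxz]
            · by_cases hzx : z < x
              · simp [lexLt, hxz, hzx] at h2
              · have hxz' : x = z := le_antisymm (not_lt.mp hzx) (not_lt.mp hxz)
                subst hxz'
                have h2' : lexLt ys zs = true := by simpa [lexLt, lt_irrefl] using h2
                simpa [lexLt, lt_irrefl] using ih ys zs h1' h2'

theorem pvForms_sorted : List.Pairwise (fun a b => lexLt a b = true) pvForms := by decide

theorem pv_sorted_getD (i j : Nat) (hij : i < j) (hj : j < pvForms.length) :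
    lexLt (pvForms.getD i []) (pvForms.getD j []) = true := by
  have hi : i < pvForms.length := lt_trans hij hj
  rw [List.getD_eq_getElem _ _ hi, List.getD_eq_getElem _ _ hj]
  exact List.pairwise_iff_getElem.mp pvForms_sorted i j hi hj hij

theorem bsLoop_inv (w : List Char) :
    ∀ (k lo hi : Nat), hi - lo = k → hi ≤ pvForms.length →
    (∀ i, i < lo → lexLt (pvForms.getD i []) w = true) →
    (∀ i, hi ≤ i → i < pvForms.length → lexLt (pvForms.getD i []) w = false) →
    (∀ i, i < bsLoop w lo hi → lexLt (pvForms.getD i []) w = true) ∧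
    (∀ i, bsLoop w lo hi ≤ i → i < pvForms.length → lexLt (pvForms.getD i []) w = false) := by
  intro k
  induction k using Nat.strong_induction_on with
  | _ k ihk =>
    intro lo hi hk hhi H1 H2
    rw [bsLoop]
    split
    case isTrue h =>
      split
      case isTrue hcmp =>
        refine ihk (hi - ((lo + hi) / 2 + 1)) (by omega) _ _ rfl hhi ?_ H2
        intro i hi'
        rcases Nat.lt_succ_iff_lt_or_eq.mp hi' with hlt | rfl
        · exact lexLt_trans _ _ _ (pv_sorted_getD i _ hlt (by omega)) hcmp
        · exact hcmp
      case isFalse hcmp =>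
        have hcmp' : lexLt (pvForms.getD ((lo + hi) / 2) []) w = false := by
          simpa using hcmp
        refine ihk ((lo + hi) / 2 - lo) (by omega) _ _ rfl (by omega) H1 ?_
        intro i hmi hin
        rcases Nat.eq_or_lt_of_le hmi with rfl | hlt
        · exact hcmp'
        · cases hval : lexLt (pvForms.getD i []) w with
          | false => rfl
          | true =>
            have := lexLt_trans _ _ _ (pv_sorted_getD _ i hlt hin) hval
            rw [this] at hcmp'; cases hcmp'
    case isFalse h =>
      exact ⟨H1, fun i hli hin => H2 i (by omega) hin⟩

theorem bs_mem (w : List Char) :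
    ((decide (bsLoop w 0 pvForms.length < pvForms.length)) &&
      (pvForms.getD (bsLoop w 0 pvForms.length) [] == w)) = true ↔ w ∈ pvForms := by
  obtain ⟨P1, P2⟩ := bsLoop_inv w pvForms.length 0 pvForms.length (by omega) (le_refl _)
    (fun i h => absurd h (Nat.not_lt_zero i))
    (fun i h1 h2 => absurd h2 (by omega))
  set r := bsLoop w 0 pvForms.length with hr
  constructor
  · intro hb
    rw [Bool.and_eq_true, decide_eq_true_iff, beq_iff_eq] at hb
    obtain ⟨hrn, heq⟩ := hb
    rw [← heq, List.getD_eq_getElem _ _ hrn]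
    exact List.getElem_mem _
  · intro hw
    obtain ⟨j, hj, hjw⟩ := List.mem_iff_getElem.mp hw
    have hjF : pvForms.getD j [] = w := by rw [List.getD_eq_getElem _ _ hj]; exact hjw
    have hirr : lexLt (pvForms.getD j []) w = false := by rw [hjF]; exact lexLt_irrefl w
    have hrj : r ≤ j := by
      by_contra hc
      rw [not_le] at hc
      have := P1 j hc
      rw [hirr] at this; cases this
    have hrn : r < pvForms.length := lt_of_le_of_lt hrj hj
    have hreq : r = j := by
      rcases Nat.eq_or_lt_of_le hrj with h | h
      · exact h
      · exfalso
        have hs : lexLt (pvForms.getD r []) w = true := by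
          rw [← hjF]; exact pv_sorted_getD r j h hj
        have hf := P2 r (le_refl r) hrn
        rw [hs] at hf; cases hf
    rw [Bool.and_eq_true, decide_eq_true_iff, beq_iff_eq]
    exact ⟨hrn, by rw [hreq]; exact hjF⟩

theorem loopA_mem (w : List Char) (us : List (List Char)) :
    pvLoopA w us = true ↔ w ∈ us ∨ w ∈ us.map (· ++ ['s']) := by
  induction us with
  | nil => simp [pvLoopA]
  | cons u rest ih =>
    simp only [pvLoopA, List.map_cons, List.mem_cons]
    by_cases h1 : w = u
    · simp [h1]
    · by_cases h2 : w = u ++ ['s']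
      · simp [h2]
      · have hb1 : (w == u) = false := by simpa using h1
        have hb2 : (w == u ++ ['s']) = false := by simpa using h2
        simp only [hb1, hb2, Bool.false_eq_true, if_false, ih]
        tauto

theorem mem_forms_iff (w : List Char) :
    (w ∈ pvUnits ∨ w ∈ pvUnits.map (· ++ ['s'])) ↔ w ∈ pvForms := by
  have h1 : ∀ x ∈ pvUnits, x ∈ pvForms := by decide
  have h2 : ∀ x ∈ pvUnits.map (· ++ ['s']), x ∈ pvForms := by decide
  have h3 : ∀ x ∈ pvForms, x ∈ pvUnits ∨ x ∈ pvUnits.map (· ++ ['s']) := by decide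
  exact ⟨fun h => h.elim (h1 w) (h2 w), h3 w⟩

-- ===== VERDICT (by name: the statement is the Claim_ definition above) =====
theorem is_unit_of_measure_spec : Claim_equal_is_unit_of_measure := by
  intro word _
  unfold Spec_is_unit_of_measure is_unit_of_measure is_unit_of_measure_alt
  set w := PySem.Chars.lower word.toList
  rw [Bool.eq_iff_iff, loopA_mem, mem_forms_iff]
  exact (bs_mem w).symm
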